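-- pv_equiv track=rewrite | github.com/stalat19/farkel | farkle.py | five_of_a_kind
-- ===== SOURCE A (Python) =====
-- def five_of_a_kind(rolls: list):
--     score = 0
--     frequencies_dict = {1:0, 2:0, 3:0, 4:0, 5:0, 6:0}
--     for roll in rolls: # count frequency of dice rolls and update dictionary
--         frequencies_dict[roll] = frequencies_dict.get(roll, 0) + 1
--
--     for number in frequencies_dict:
--         frequency = frequencies_dict[number]
--         if frequency == 5:
--             if number == 1:
--                 score += 4000
--             else:
--                 score += (number * 400)
--             frequencies_dict[number] -= 5 # remove the 5 of a kind from the frequencies_dict to avoid double counting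
--
--     score += frequencies_dict[1] * 100 + frequencies_dict[5] * 50
--     return score
-- ===== SOURCE B (Python) =====
-- def five_of_a_kind(rolls: list):
--     # single pass over the sorted copy, scanning maximal runs of equal faces
--     score = 0
--     srt = sorted(rolls)
--     i = 0
--     n = len(srt)
--     while i < n:
--         v = srt[i]
--         j = i
--         while j < n and srt[j] == v:
--             j += 1
--         c = j - i
--         if c == 5:
--             score += 4000 if v == 1 else v * 400
--             c -= 5
--         if v == 1:
--             score += c * 100
--         elif v == 5:
--             score += c * 50
--         i = j
--     return score
-- ===== Notes on version B (the rewrite author's own statement) =====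
-- stated objective: alternative
-- what changed: B replaces A's frequency-dictionary (count pass + dict-key pass + final lookups) by sorting a copy of the rolls and scoring each maximal run of equal faces in a single scan.
import Mathlib
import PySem

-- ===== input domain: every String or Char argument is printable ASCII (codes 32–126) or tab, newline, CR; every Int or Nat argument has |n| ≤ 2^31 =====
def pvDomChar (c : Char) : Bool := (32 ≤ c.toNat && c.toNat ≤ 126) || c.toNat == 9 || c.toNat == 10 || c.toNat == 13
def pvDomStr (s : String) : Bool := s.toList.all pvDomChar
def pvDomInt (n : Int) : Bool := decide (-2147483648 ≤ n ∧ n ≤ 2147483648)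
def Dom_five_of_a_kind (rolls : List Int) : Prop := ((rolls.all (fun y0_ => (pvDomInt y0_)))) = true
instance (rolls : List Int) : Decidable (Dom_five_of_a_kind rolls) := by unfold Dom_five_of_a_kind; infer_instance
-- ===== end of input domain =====

-- B replaces A's frequency-dictionary passes by one scan of maximal runs over a sorted copy
-- (objective: alternative algorithm, similar cost).

-- ===== PORT A =====
-- the body of A's second loop (state: (score, frequencies_dict))
def stepA (p : Int × PySem.Dict Int Int) (number : Int) : Int × PySem.Dict Int Int :=
  let frequency := p.2.getD number 0
  if frequency == 5 then
    (p.1 + (if number == 1 then 4000 else number * 400),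
     p.2.insert number (p.2.getD number 0 - 5))
  else p

def five_of_a_kind (rolls : List Int) : Int :=
  let score : Int := 0
  let frequencies : PySem.Dict Int Int :=
    PySem.Dict.ofList [(1, 0), (2, 0), (3, 0), (4, 0), (5, 0), (6, 0)]
  -- for roll in rolls: frequencies_dict[roll] = frequencies_dict.get(roll, 0) + 1
  let frequencies := rolls.foldl (fun d roll => d.insert roll (d.getD roll 0 + 1)) frequencies
  -- for number in frequencies_dict: … (only values are mutated, so the key view is the fixed key list)
  let sd := frequencies.keys.foldl stepA (score, frequencies)
  sd.1 + sd.2.getD 1 0 * 100 + sd.2.getD 5 0 * 50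

-- ===== PORT B =====
-- outer while of Source B: one step per maximal run of the sorted list
def scanRuns (srt : List Int) : Int :=
  match srt with
  | [] => 0
  | v :: rest =>
    -- inner while: j advances over the equal run; run = j - i
    let run : Nat := (rest.takeWhile (fun y => y == v)).length + 1
    let c : Int := (run : Int)
    let s1 : Int := if c == 5 then (if v == 1 then 4000 else v * 400) else 0
    let c : Int := if c == 5 then c - 5 else c
    let s2 : Int := if v == 1 then c * 100 else if v == 5 then c * 50 else 0
    s1 + s2 + scanRuns (rest.dropWhile (fun y => y == v))
termination_by srt.length
decreasing_by
  simp only [List.length_cons]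
  exact Nat.lt_succ_of_le (List.length_dropWhile_le _ _)

def five_of_a_kind_alt (rolls : List Int) : Int :=
  scanRuns (PySem.List.sorted rolls (fun x => x) false)

-- ===== PRECONDITION & SPEC =====
def Spec_five_of_a_kind (rolls : List Int) (out : Int) : Prop := out = five_of_a_kind_alt rolls
instance (rolls : List Int) (out : Int) : Decidable (Spec_five_of_a_kind rolls out) := by unfold Spec_five_of_a_kind; infer_instance

-- ===== CLAIM (what is proved, stated in full; the proofs are below) =====
def Claim_equal_five_of_a_kind : Prop := ∀ (rolls : List Int), Dom_five_of_a_kind rolls → Spec_five_of_a_kind rolls (five_of_a_kind rolls)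

-- ===== LEMMAS AND PROOFS =====

-- the per-value contribution both programs award to a face v occurring c times
def runScore (v c : Int) : Int :=
  (if c = 5 then (if v = 1 then 4000 else v * 400) else 0) +
  (if v = 1 then (if c = 5 then c - 5 else c) * 100
   else if v = 5 then (if c = 5 then c - 5 else c) * 50 else 0)

-- the canonical value: sum of runScore over the distinct faces
def canon (rolls : List Int) : Int :=
  ∑ v ∈ rolls.toFinset, runScore v ((rolls.count v : Int))

-- ---------- B = canon ----------

lemma dropWhile_gt (v : Int) (l : List Int)
    (h : (v :: l).Pairwise (· ≤ ·)) :
    ∀ x ∈ l.dropWhile (fun y => y == v), v < x := by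
  induction l with
  | nil => simp
  | cons a t ih =>
    intro x hx
    by_cases hav : (a == v) = true
    · rw [show List.dropWhile (fun y => y == v) (a :: t) = List.dropWhile (fun y => y == v) t from List.dropWhile_cons_of_pos hav] at hx
      have hav' : a = v := by simpa using hav
      apply ih _ x hx
      subst hav'
      exact (List.pairwise_cons.mp h).2
    · rw [show List.dropWhile (fun y => y == v) (a :: t) = a :: t from List.dropWhile_cons_of_neg hav] at hx
      have h1 := List.pairwise_cons.mp h
      have hva : v ≤ a := h1.1 a (by simp)
      have hane : a ≠ v := by simpa using hav
      have hva' : v < a := lt_of_le_of_ne hva (Ne.symm hane)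
      rcases List.mem_cons.mp hx with rfl | hxt
      · exact hva'
      · have h2 := List.pairwise_cons.mp h1.2
        exact lt_of_lt_of_le hva' (h2.1 x hxt)

lemma scanRuns_eq_canon_aux (n : Nat) : ∀ (l : List Int), l.length ≤ n → l.Pairwise (· ≤ ·) →
    scanRuns l = ∑ v ∈ l.toFinset, runScore v ((l.count v : Int)) := by
  induction n with
  | zero =>
    intro l hl _
    have : l = [] := List.eq_nil_of_length_eq_zero (Nat.le_zero.mp hl)
    subst this; simp [scanRuns]
  | succ n ih =>
    intro l hl h
    match l with
    | [] => simp [scanRuns]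
    | v :: rest =>
      have hrest : rest.Pairwise (· ≤ ·) := (List.pairwise_cons.mp h).2
      have hgt : ∀ x ∈ rest.dropWhile (fun y => y == v), v < x := dropWhile_gt v rest h
      have hsd : (rest.dropWhile (fun y => y == v)).Pairwise (· ≤ ·) :=
        List.Pairwise.sublist (List.dropWhile_sublist _) hrest
      have hlen0 := List.length_dropWhile_le (fun y => y == v) rest
      set tw := rest.takeWhile (fun y => y == v) with htw
      set dw := rest.dropWhile (fun y => y == v) with hdw
      have htd : tw ++ dw = rest := List.takeWhile_append_dropWhile
      have hvd : v ∉ dw := fun hm => lt_irrefl v (hgt v hm)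
      have hteq : ∀ x ∈ tw, x = v := by
        intro x hx
        have := List.mem_takeWhile_imp hx
        simpa using this
      have hsplit : ∀ w : Int, rest.count w = tw.count w + dw.count w := by
        intro w
        conv_lhs => rw [← htd]
        rw [List.count_append]
      have hmem : ∀ x : Int, x ∈ rest ↔ x ∈ tw ∨ x ∈ dw := by
        intro x
        conv_lhs => rw [← htd]
        exact List.mem_append
      have hcv : (v :: rest).count v = tw.length + 1 := by
        rw [List.count_cons_self, hsplit v]
        rw [List.count_eq_zero.mpr hvd]
        rw [List.count_eq_length.mpr (fun b hb => (hteq b hb).symm)]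
      have hcw : ∀ w ∈ dw, (v :: rest).count w = dw.count w := by
        intro w hw
        have hwv : v < w := hgt w hw
        rw [List.count_cons_of_ne (by omega), hsplit w]
        have htz : tw.count w = 0 := by
          rw [List.count_eq_zero]
          intro hm
          exact absurd (hteq w hm) (by omega)
        omega
      have hfin : (v :: rest).toFinset = insert v dw.toFinset := by
        ext x
        simp only [List.toFinset_cons, Finset.mem_insert, List.mem_toFinset, hmem x]
        constructor
        · rintro (rfl | hx | hx)
          · exact Or.inl rfl
          · exact Or.inl (hteq x hx)
          · exact Or.inr hx
        · rintro (rfl | hx)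
          · exact Or.inl rfl
          · exact Or.inr (Or.inr hx)
      have hnd : v ∉ dw.toFinset := by
        simpa [List.mem_toFinset] using hvd
      have hlen : dw.length ≤ n := by
        have h2 : rest.length + 1 ≤ n + 1 := by simpa using hl
        omega
      rw [scanRuns, hfin, Finset.sum_insert hnd]
      have hsum : ∑ w ∈ dw.toFinset, runScore w (((v :: rest).count w : Int))
          = ∑ w ∈ dw.toFinset, runScore w ((dw.count w : Int)) := by
        apply Finset.sum_congr rfl
        intro w hw
        rw [hcw w (List.mem_toFinset.mp hw)]
      rw [hsum, ← ih _ hlen hsd, hcv]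
      simp only [runScore, beq_iff_eq, ← htw, ← hdw]

-- ---------- A = canon ----------

lemma foldl_stepA (c : Int → Int) (ks : List Int) :
    ∀ (s : Int) (d : PySem.Dict Int Int), ks.Nodup →
    (∀ k ∈ ks, d.getD k 0 = c k) →
    (ks.foldl stepA (s, d)).1
        = s + (ks.map (fun k => if c k = 5 then (if k = 1 then 4000 else k * 400) else 0)).sum
    ∧ ∀ v, (ks.foldl stepA (s, d)).2.getD v 0
        = if v ∈ ks ∧ c v = 5 then c v - 5 else d.getD v 0 := by
  induction ks with
  | nil => intro s d _ _; simp
  | cons k ks ih =>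
    intro s d hnd hgd
    have hk : d.getD k 0 = c k := hgd k (by simp)
    have hnd' : ks.Nodup := (List.nodup_cons.mp hnd).2
    have hkn : k ∉ ks := (List.nodup_cons.mp hnd).1
    rw [List.foldl_cons]
    by_cases h5 : c k = 5
    · have hstep : stepA (s, d) k
          = (s + (if k = 1 then 4000 else k * 400), d.insert k (d.getD k 0 - 5)) := by
        simp [stepA, hk, h5]
      rw [hstep]
      have hgd' : ∀ j ∈ ks, (d.insert k (d.getD k 0 - 5)).getD j 0 = c j := by
        intro j hj
        have hjk : j ≠ k := fun e => hkn (e ▸ hj)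
        rw [PySem.Dict.getD_insert, if_neg hjk]
        exact hgd j (List.mem_cons_of_mem _ hj)
      obtain ⟨ih1, ih2⟩ := ih _ _ hnd' hgd'
      constructor
      · rw [ih1]; simp [h5]; ring
      · intro v
        rw [ih2 v, PySem.Dict.getD_insert]
        by_cases hv : v ∈ ks ∧ c v = 5
        · simp [hv]
        · rw [if_neg hv]
          by_cases hvk : v = k
          · subst hvk; simp [h5, hk]
          · simp [hvk, hv]
    · have hstep : stepA (s, d) k = (s, d) := by
        simp [stepA, hk, h5]
      rw [hstep]
      obtain ⟨ih1, ih2⟩ := ih _ _ hnd' (fun j hj => hgd j (List.mem_cons_of_mem _ hj))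
      constructor
      · rw [ih1]; simp [h5]
      · intro v
        rw [ih2 v]
        by_cases hvk : v = k
        · subst hvk; simp [h5, hkn]
        · simp [hvk]

lemma d0_getD (k : Int) :
    (PySem.Dict.ofList [((1:Int), (0:Int)), (2, 0), (3, 0), (4, 0), (5, 0), (6, 0)]).getD k 0 = 0 := by
  have h : (PySem.Dict.ofList [((1:Int), (0:Int)), (2, 0), (3, 0), (4, 0), (5, 0), (6, 0)]).items
      = [((1:Int), (0:Int)), (2, 0), (3, 0), (4, 0), (5, 0), (6, 0)] := by decide
  rw [PySem.Dict.getD_eq_get?_getD,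
    show (PySem.Dict.ofList [((1:Int), (0:Int)), (2, 0), (3, 0), (4, 0), (5, 0), (6, 0)])
      = PySem.Dict.mk [((1:Int), (0:Int)), (2, 0), (3, 0), (4, 0), (5, 0), (6, 0)] from
      PySem.Dict.ext h]
  simp [PySem.Dict.get?_mk_cons]
  split_ifs <;> rfl

lemma A_eq_canon (rolls : List Int) : five_of_a_kind rolls = canon rolls := by
  simp only [five_of_a_kind]
  set c : Int → Int := fun k => ((rolls.count k : Int)) with hc
  set d0 : PySem.Dict Int Int :=
    PySem.Dict.ofList [((1:Int), (0:Int)), (2, 0), (3, 0), (4, 0), (5, 0), (6, 0)] with hd0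
  set d1 := rolls.foldl (fun d roll => d.insert roll (d.getD roll 0 + 1)) d0 with hd1
  have hgd : ∀ k, d1.getD k 0 = c k := by
    intro k
    rw [hd1, PySem.Dict.getD_foldl_insert_add_one, hd0, d0_getD k]
    simp [hc]
  have hkeys : d1.keys = PySem.Set.update d0.keys rolls :=
    PySem.Dict.keys_foldl_insert rolls _ d0
  have hd0keys : d0.keys = [1, 2, 3, 4, 5, 6] := by rw [hd0]; decide
  have hnodup : d1.keys.Nodup :=
    PySem.Dict.nodup_keys_foldl_insert rolls _ d0 (by rw [hd0keys]; decide)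
  have h1K : (1 : Int) ∈ d1.keys := by
    rw [hkeys, PySem.Set.update_eq_append_filter, List.mem_append, hd0keys]
    exact Or.inl (by decide)
  have h5K : (5 : Int) ∈ d1.keys := by
    rw [hkeys, PySem.Set.update_eq_append_filter, List.mem_append, hd0keys]
    exact Or.inl (by decide)
  have hmemK : ∀ v ∈ rolls, v ∈ d1.keys := by
    intro v hv
    rw [hkeys, PySem.Set.update_eq_append_filter, List.mem_append]
    by_cases hvk : v ∈ d0.keys
    · exact Or.inl hvk
    · right
      rw [List.mem_filter]
      refine ⟨(PySem.Set.mem_ofList rolls v).mpr hv, ?_⟩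
      simpa using hvk
  obtain ⟨hs, hd⟩ := foldl_stepA c d1.keys 0 d1 hnodup (fun k _ => hgd k)
  rw [hs, hd 1, hd 5, hgd 1, hgd 5]
  have hif1 : (if 1 ∈ d1.keys ∧ c 1 = 5 then c 1 - 5 else c 1)
      = (if c 1 = 5 then c 1 - 5 else c 1) := by simp [h1K]
  have hif5 : (if 5 ∈ d1.keys ∧ c 5 = 5 then c 5 - 5 else c 5)
      = (if c 5 = 5 then c 5 - 5 else c 5) := by simp [h5K]
  rw [hif1, hif5]
  have hsumK : (List.map (fun k => if c k = 5 then if k = 1 then 4000 else k * 400 else 0)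
        d1.keys).sum
      = ∑ v ∈ d1.keys.toFinset, (if c v = 5 then if v = 1 then 4000 else v * 400 else 0) :=
    (List.sum_toFinset _ hnodup).symm
  have hsub : rolls.toFinset ⊆ d1.keys.toFinset := by
    intro v hv
    rw [List.mem_toFinset] at hv ⊢
    exact hmemK v hv
  have hsubeq : ∑ v ∈ d1.keys.toFinset, (if c v = 5 then if v = 1 then 4000 else v * 400 else 0)
      = ∑ v ∈ rolls.toFinset, (if c v = 5 then if v = 1 then 4000 else v * 400 else 0) := by
    symm
    apply Finset.sum_subset hsub
    intro v _ hvF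
    have hcv : rolls.count v = 0 :=
      List.count_eq_zero.mpr (fun hm => hvF (List.mem_toFinset.mpr hm))
    simp [hc, hcv]
  rw [hsumK, hsubeq]
  unfold canon runScore
  rw [Finset.sum_add_distrib]
  have hsplit : ∀ v : Int,
      (if v = 1 then (if c v = 5 then c v - 5 else c v) * 100
       else if v = 5 then (if c v = 5 then c v - 5 else c v) * 50 else 0)
      = (if v = 1 then (if c 1 = 5 then c 1 - 5 else c 1) * 100 else 0)
        + (if v = 5 then (if c 5 = 5 then c 5 - 5 else c 5) * 50 else 0) := by
    intro v
    by_cases h1 : v = 1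
    · subst h1; norm_num
    · by_cases h5 : v = 5
      · subst h5; norm_num
      · simp [h1, h5]
  rw [Finset.sum_congr rfl (fun v _ => hsplit v), Finset.sum_add_distrib]
  rw [Finset.sum_ite_eq' rolls.toFinset (1 : Int)
    (fun _ => (if c 1 = 5 then c 1 - 5 else c 1) * 100)]
  rw [Finset.sum_ite_eq' rolls.toFinset (5 : Int)
    (fun _ => (if c 5 = 5 then c 5 - 5 else c 5) * 50)]
  have e1 : (if (1:Int) ∈ rolls.toFinset then (if c 1 = 5 then c 1 - 5 else c 1) * 100 else 0)
      = (if c 1 = 5 then c 1 - 5 else c 1) * 100 := by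
    by_cases h1F : (1:Int) ∈ rolls.toFinset
    · rw [if_pos h1F]
    · rw [if_neg h1F]
      have hz : rolls.count 1 = 0 :=
        List.count_eq_zero.mpr (fun hm => h1F (List.mem_toFinset.mpr hm))
      simp [hc, hz]
  have e5 : (if (5:Int) ∈ rolls.toFinset then (if c 5 = 5 then c 5 - 5 else c 5) * 50 else 0)
      = (if c 5 = 5 then c 5 - 5 else c 5) * 50 := by
    by_cases h5F : (5:Int) ∈ rolls.toFinset
    · rw [if_pos h5F]
    · rw [if_neg h5F]
      have hz : rolls.count 5 = 0 :=
        List.count_eq_zero.mpr (fun hm => h5F (List.mem_toFinset.mpr hm))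
      simp [hc, hz]
  rw [e1, e5]
  ring

lemma B_eq_canon (rolls : List Int) : five_of_a_kind_alt rolls = canon rolls := by
  have hperm : (PySem.List.sorted rolls (fun x => x) false).Perm rolls :=
    PySem.List.sorted_perm rolls _ _
  have h := scanRuns_eq_canon_aux (PySem.List.sorted rolls (fun x => x) false).length
    (PySem.List.sorted rolls (fun x => x) false) le_rfl
    (PySem.List.sorted_pairwise rolls (fun x => x))
  unfold five_of_a_kind_alt canon
  rw [h]
  apply Finset.sum_congr
  · exact List.toFinset_eq_of_perm _ _ hperm
  · intro v hv
    rw [hperm.count_eq]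

-- ===== VERDICT (by name: the statement is the Claim_ definition above) =====
theorem five_of_a_kind_spec : Claim_equal_five_of_a_kind := by
  intro rolls _
  unfold Spec_five_of_a_kind
  rw [A_eq_canon, B_eq_canon]
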